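-- pv_equiv track=rewrite | github.com/cgshpi/Large-Scale-Evaluation-of-Topic-Models-and-Dimensionality-Reduction-Methods-for-2D-Text-Spatializati | code_preprocessing.py | corpus_minus_split
-- ===== SOURCE A (Python) =====
-- def minus_split(str):
--     return str.split("-")
--
-- def corpus_minus_split(corpus):
--     corpus_minus_split = []
--     for document in corpus:
--         document_minus_split = []
--         for term in document:
--             document_minus_split = document_minus_split + minus_split(term)
--         corpus_minus_split.append(document_minus_split)
--     return corpus_minus_split
-- ===== SOURCE B (Python) =====
-- def corpus_minus_split(corpus):
--     return [('-'.join(document)).split('-') if document else []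
--             for document in corpus]
-- ===== Notes on version B (the rewrite author's own statement) =====
-- stated objective: faster
-- what changed: Instead of splitting every term and concatenating the pieces with repeated quadratic list addition, B joins each document into one string with '-' and splits it once (empty documents map directly to []).
import Mathlib
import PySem

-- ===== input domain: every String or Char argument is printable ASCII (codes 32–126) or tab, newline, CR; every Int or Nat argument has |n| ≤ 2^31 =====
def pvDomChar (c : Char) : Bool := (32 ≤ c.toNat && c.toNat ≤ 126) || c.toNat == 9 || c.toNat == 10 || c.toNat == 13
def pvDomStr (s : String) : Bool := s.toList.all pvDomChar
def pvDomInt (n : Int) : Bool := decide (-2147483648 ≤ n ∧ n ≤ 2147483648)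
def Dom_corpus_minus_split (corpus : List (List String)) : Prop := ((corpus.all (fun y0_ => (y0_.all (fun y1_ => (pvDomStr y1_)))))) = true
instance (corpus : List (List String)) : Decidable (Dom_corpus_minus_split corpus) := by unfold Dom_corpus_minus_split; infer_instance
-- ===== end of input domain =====

-- B joins each document with '-' and splits once instead of splitting every term and
-- concatenating with repeated quadratic list addition (measured faster; equivalence is about the return value, neither mutates).

-- ===== PORT A =====
def minus_split (s : String) : List String :=
  (PySem.Chars.splitOn s.toList ['-']).map String.ofList

def corpus_minus_split (corpus : List (List String)) : List (List String) :=
  corpus.foldl (fun acc document =>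
    acc ++ [document.foldl (fun dacc term => dacc ++ minus_split term) []]) []

-- ===== PORT B =====
def corpus_minus_split_alt (corpus : List (List String)) : List (List String) :=
  corpus.map (fun document =>
    if document = [] then []
    else (PySem.Chars.splitOn (PySem.Str.join "-" document).toList ['-']).map String.ofList)

-- ===== PRECONDITION & SPEC =====
def Spec_corpus_minus_split (corpus : List (List String)) (out : List (List String)) : Prop := out = corpus_minus_split_alt corpus
instance (corpus : List (List String)) (out : List (List String)) : Decidable (Spec_corpus_minus_split corpus out) := by unfold Spec_corpus_minus_split; infer_instance

-- ===== CLAIM (what is proved, stated in full; the proofs are below) =====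
def Claim_equal_corpus_minus_split : Prop := ∀ (corpus : List (List String)), Dom_corpus_minus_split corpus → Spec_corpus_minus_split corpus (corpus_minus_split corpus)

-- ===== LEMMAS AND PROOFS =====

-- structural model of Python's str.split("-") on char lists
def pvGlue (p : List Char) : List (List Char) → List (List Char)
  | [] => [p]
  | h :: t => (p ++ h) :: t

def pvSplit : List Char → List (List Char)
  | [] => [[]]
  | c :: rest => if c = '-' then [] :: pvSplit rest else pvGlue [c] (pvSplit rest)

theorem pvSplit_ne_nil (l : List Char) : pvSplit l ≠ [] := by
  cases l with
  | nil => simp [pvSplit]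
  | cons c rest =>
    simp only [pvSplit]
    split
    · simp
    · cases h : pvSplit rest <;> simp [pvGlue]

theorem pvGlue_nil_of_ne (xs : List (List Char)) (h : xs ≠ []) : pvGlue [] xs = xs := by
  cases xs with
  | nil => exact absurd rfl h
  | cons a t => simp [pvGlue]

theorem pvGlue_append (p : List Char) (c : Char) (xs : List (List Char)) :
    pvGlue (p ++ [c]) xs = pvGlue p (pvGlue [c] xs) := by
  cases xs <;> simp [pvGlue]

theorem pvGlue_append_right (p : List Char) (a b : List (List Char)) (h : a ≠ []) :
    pvGlue p (a ++ b) = pvGlue p a ++ b := by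
  cases a with
  | nil => exact absurd rfl h
  | cons x t => simp [pvGlue]

theorem splitOn_go_eq (l : List Char) : ∀ (fuel : Nat) (cur : List Char) (acc : List (List Char)),
    l.length ≤ fuel →
    PySem.Chars.splitOn.go ['-'] fuel l cur acc = acc.reverse ++ pvGlue cur.reverse (pvSplit l) := by
  induction l with
  | nil =>
    intro fuel cur acc _
    cases fuel <;> simp [PySem.Chars.splitOn.go, pvSplit, pvGlue]
  | cons c rest ih =>
    intro fuel cur acc hfuel
    cases fuel with
    | zero => simp at hfuel
    | succ f =>
      simp only [List.length_cons, Nat.succ_le_succ_iff] at hfuel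
      by_cases hc : c = '-'
      · subst hc
        have hpre : List.isPrefixOf ['-'] ('-' :: rest) = true := by
          simp [List.isPrefixOf]
        simp only [PySem.Chars.splitOn.go, hpre, if_pos]
        rw [show List.drop (List.length ['-']) ('-' :: rest) = rest by simp]
        rw [ih f [] (cur.reverse :: acc) hfuel]
        simp only [List.reverse_cons, List.reverse_nil, List.append_assoc, List.singleton_append]
        rw [pvGlue_nil_of_ne _ (pvSplit_ne_nil rest)]
        rw [show pvSplit ('-' :: rest) = [] :: pvSplit rest from by simp [pvSplit]]
        simp [pvGlue]
      · have hpre : List.isPrefixOf ['-'] (c :: rest) = false := by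
          simp [List.isPrefixOf]
          intro h; exact hc h.symm
        simp only [PySem.Chars.splitOn.go, hpre]
        rw [if_neg (by simp)]
        rw [ih f (c :: cur) acc hfuel]
        simp only [List.reverse_cons]
        rw [pvGlue_append, pvSplit]
        rw [if_neg hc]

theorem splitOn_eq (l : List Char) : PySem.Chars.splitOn l ['-'] = pvSplit l := by
  unfold PySem.Chars.splitOn
  rw [splitOn_go_eq l (l.length + 1) [] [] (by omega)]
  simp [pvGlue_nil_of_ne _ (pvSplit_ne_nil l)]

theorem pvSplit_append (x y : List Char) :
    pvSplit (x ++ '-' :: y) = pvSplit x ++ pvSplit y := by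
  induction x with
  | nil => simp [pvSplit]
  | cons c x' ih =>
    by_cases hc : c = '-'
    · subst hc; simp [pvSplit, ih]
    · simp only [List.cons_append, pvSplit, if_neg hc, ih]
      exact pvGlue_append_right [c] _ _ (pvSplit_ne_nil x')

theorem pvSplit_intercalate (parts : List (List Char)) (h : parts ≠ []) :
    pvSplit (List.intercalate ['-'] parts) = parts.flatMap pvSplit := by
  induction parts with
  | nil => exact absurd rfl h
  | cons x rest ih =>
    cases rest with
    | nil => simp [List.intercalate]
    | cons y zs =>
      have : List.intercalate ['-'] (x :: y :: zs) = x ++ '-' :: List.intercalate ['-'] (y :: zs) := by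
        simp [List.intercalate, List.intersperse]
      rw [this, pvSplit_append, ih (by simp)]
      simp

theorem foldl_append_flatMap (f : String → List String) (d : List String) :
    ∀ (acc : List String), d.foldl (fun a t => a ++ f t) acc = acc ++ d.flatMap f := by
  induction d with
  | nil => intro acc; simp
  | cons t ts ih => intro acc; simp [List.foldl, ih]

theorem foldl_append_map (g : List String → List String) (c : List (List String)) :
    ∀ (acc : List (List String)), c.foldl (fun a d => a ++ [g d]) acc = acc ++ c.map g := by
  induction c with
  | nil => intro acc; simp
  | cons d ds ih => intro acc; simp [List.foldl, ih]

theorem doc_eq (d : List String) :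
    d.foldl (fun dacc term => dacc ++ minus_split term) [] =
      (if d = [] then []
       else (PySem.Chars.splitOn (PySem.Str.join "-" d).toList ['-']).map String.ofList) := by
  rw [foldl_append_flatMap]
  cases d with
  | nil => simp
  | cons t ts =>
    rw [if_neg (by simp)]
    rw [splitOn_eq]
    have hjoin : (PySem.Str.join "-" (t :: ts)).toList
        = List.intercalate ['-'] ((t :: ts).map String.toList) := by
      simp [PySem.Str.join, PySem.Chars.join, String.toList_ofList]
    rw [hjoin, pvSplit_intercalate _ (by simp)]
    simp only [List.nil_append, List.flatMap_map]
    rw [List.map_flatMap]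
    congr 1
    funext s
    simp [minus_split, splitOn_eq]

-- ===== VERDICT (by name: the statement is the Claim_ definition above) =====
theorem corpus_minus_split_spec : Claim_equal_corpus_minus_split := by
  intro corpus _
  unfold Spec_corpus_minus_split corpus_minus_split corpus_minus_split_alt
  rw [foldl_append_map]
  simp only [List.nil_append]
  congr 1
  funext d
  exact doc_eq d
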